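-- pv_equiv track=rewrite | github.com/ywkimwra/yukimura | BigO/Fibonacci Linked List.py | fib_linked_list
-- ===== SOURCE A (Python) =====
-- class Node:
--     def __init__(self, data):
--         self.data = data
--         self.next = None
--
-- class LinkedList:
--     def __init__(self):
--         self.head = None
--
--     def append(self, data):
--         new_node = Node(data)
--         if self.head is None:
--             self.head = new_node
--         else:
--             current = self.head
--             while current.next is not None:
--                 current = current.next
--             current.next = new_node
--
--     def to_list(self):
--         result = []
--         current = self.head
--         while current is not None:
--             result.append(current.data)
--             current = current.next
--         return result
--
-- def fib_linked_list(x, y, n):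
--     linked_list = LinkedList()
--
--     linked_list.append(x)
--     linked_list.append(y)
--
--     current = linked_list.head
--
--     for _ in range(n - 2):
--         next_data = (current.data + current.next.data) % (10**6 + 7)
--         new_node = Node(next_data)
--         current.next.next = new_node
--         current = current.next
--
--     return linked_list.to_list()
-- ===== SOURCE B (Python) =====
-- def fib_linked_list(x, y, n):
--     M = 10**6 + 7
--     # Stage 1: Fibonacci coefficient pairs (F(j-1) % M, F(j) % M) for j = 2..n-1,
--     # independent of x and y.
--     coeffs = []
--     u, v = 1, 1
--     for _ in range(n - 2):
--         coeffs.append((u, v))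
--         u, v = v, (u + v) % M
--     # Stage 2: by linearity, term j of the sequence is (F(j-1)*x + F(j)*y) % M.
--     return [x, y] + [(p * x + q * y) % M for (p, q) in coeffs]
-- ===== Notes on version B (the rewrite author's own statement) =====
-- stated objective: alternative
-- what changed: Replaces the linked-list walk that adds each new term from the two previous data values with a two-stage closed-form computation: first a table of Fibonacci coefficient pairs mod 10**6+7 (independent of x and y), then a map producing each term as the linear combination (F(j-1)*x + F(j)*y) % (10**6+7).
import Mathlib
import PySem

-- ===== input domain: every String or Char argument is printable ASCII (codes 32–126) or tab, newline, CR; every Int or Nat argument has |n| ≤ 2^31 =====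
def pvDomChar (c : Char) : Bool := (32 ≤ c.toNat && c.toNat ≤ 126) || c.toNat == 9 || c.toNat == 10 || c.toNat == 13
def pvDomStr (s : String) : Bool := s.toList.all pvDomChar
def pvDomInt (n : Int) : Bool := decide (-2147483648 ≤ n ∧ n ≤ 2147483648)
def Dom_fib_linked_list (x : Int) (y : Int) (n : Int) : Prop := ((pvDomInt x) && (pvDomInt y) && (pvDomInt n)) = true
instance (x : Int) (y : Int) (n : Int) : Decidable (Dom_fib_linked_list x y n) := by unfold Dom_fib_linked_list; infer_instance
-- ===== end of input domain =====

-- B replaces A's linked-list walk (each term added from the two previous data values)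
-- with a two-stage closed-form computation: a table of Fibonacci coefficient pairs mod
-- 10^6+7 followed by a map taking each term to (F(j-1)*x + F(j)*y) % (10^6+7).


-- ===== PORT A =====
-- A's loop walks a pointer along the chain; each step reads current.data and
-- current.next.data, links a new tail node (current.data + current.next.data) % 10**6+7,
-- and advances.  The chain from the current pointer onward is exactly this recursion:
-- steps remaining, current.data, current.next.data.
def fibWalk : Nat → Int → Int → List Int
  | 0, a, b => [a, b]
  | k + 1, a, b => a :: fibWalk k b (PySem.Int.mod (a + b) 1000007)

-- range(n - 2) iterations; to_list collects the whole chain starting at the head (x, y).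
def fib_linked_list (x : Int) (y : Int) (n : Int) : List Int :=
  fibWalk (n - 2).toNat x y

-- ===== PORT B =====
-- Stage 1: coeffs = []; u, v = 1, 1; for _ in range(n-2): coeffs.append((u,v)); u, v = v, (u+v) % M
def coeffPairs : Nat → Int → Int → List (Int × Int)
  | 0, _, _ => []
  | k + 1, u, v => (u, v) :: coeffPairs k v (PySem.Int.mod (u + v) 1000007)

-- Stage 2: [x, y] + [(p*x + q*y) % M for (p, q) in coeffs]
def fib_linked_list_alt (x : Int) (y : Int) (n : Int) : List Int :=
  [x, y] ++ (coeffPairs (n - 2).toNat 1 1).map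
    (fun p => PySem.Int.mod (p.1 * x + p.2 * y) 1000007)

-- ===== PRECONDITION & SPEC =====
def Spec_fib_linked_list (x : Int) (y : Int) (n : Int) (out : List Int) : Prop := out = fib_linked_list_alt x y n
instance (x : Int) (y : Int) (n : Int) (out : List Int) : Decidable (Spec_fib_linked_list x y n out) := by unfold Spec_fib_linked_list; infer_instance

-- ===== CLAIM (what is proved, stated in full; the proofs are below) =====
def Claim_equal_fib_linked_list : Prop := ∀ (x : Int) (y : Int) (n : Int), Dom_fib_linked_list x y n → Spec_fib_linked_list x y n (fib_linked_list x y n)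

-- ===== LEMMAS AND PROOFS =====

-- The list of the k terms A's loop links after the two initial nodes.
def gTail : Nat → Int → Int → List Int
  | 0, _, _ => []
  | k + 1, a, b =>
      PySem.Int.mod (a + b) 1000007 :: gTail k b (PySem.Int.mod (a + b) 1000007)

theorem fibWalk_eq_gTail : ∀ (k : Nat) (a b : Int), fibWalk k a b = a :: b :: gTail k a b := by
  intro k
  induction k with
  | zero => intro a b; rfl
  | succ k ih => intro a b; simp [fibWalk, gTail, ih]

-- Invariant: if a ≡ (2u-v)x + (v-u)y and b ≡ (v-u)x + u·y (mod 10^6+7), the walk's new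
-- terms are exactly the mapped coefficient pairs starting at (u, v).
theorem gTail_eq_map (x y : Int) : ∀ (k : Nat) (a b u v : Int),
    Int.ModEq 1000007 a ((2*u - v)*x + (v - u)*y) →
    Int.ModEq 1000007 b ((v - u)*x + u*y) →
    gTail k a b = (coeffPairs k u v).map
      (fun p => PySem.Int.mod (p.1 * x + p.2 * y) 1000007) := by
  intro k
  induction k with
  | zero => intro a b u v _ _; rfl
  | succ k ih =>
    intro a b u v Ha Hb
    have hM : (0 : Int) < 1000007 := by norm_num
    simp only [gTail, coeffPairs, List.map_cons]
    have hab : Int.ModEq 1000007 (a + b) (u*x + v*y) := by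
      have h := Ha.add Hb
      calc a + b ≡ ((2*u - v)*x + (v - u)*y) + ((v - u)*x + u*y) [ZMOD 1000007] := h
        _ = u*x + v*y := by ring
    have hhead : PySem.Int.mod (a + b) 1000007 = PySem.Int.mod (u*x + v*y) 1000007 := by
      rw [PySem.Int.mod_eq_emod_of_pos hM, PySem.Int.mod_eq_emod_of_pos hM]
      exact hab
    have hv2 : Int.ModEq 1000007 (PySem.Int.mod (u + v) 1000007) (u + v) := by
      rw [PySem.Int.mod_eq_emod_of_pos hM]
      exact Int.emod_emod_of_dvd _ dvd_rfl
    have Ha' : Int.ModEq 1000007 b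
        ((2*v - PySem.Int.mod (u + v) 1000007)*x + (PySem.Int.mod (u + v) 1000007 - v)*y) := by
      have h1 : Int.ModEq 1000007 ((2*v - PySem.Int.mod (u + v) 1000007)*x) ((v - u)*x) := by
        have : Int.ModEq 1000007 (2*v - PySem.Int.mod (u + v) 1000007) (v - u) := by
          have := (Int.ModEq.refl (2*v)).sub hv2
          calc 2*v - PySem.Int.mod (u + v) 1000007 ≡ 2*v - (u + v) [ZMOD 1000007] := this
            _ = v - u := by ring
        exact this.mul_right x
      have h2 : Int.ModEq 1000007 ((PySem.Int.mod (u + v) 1000007 - v)*y) (u*y) := by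
        have : Int.ModEq 1000007 (PySem.Int.mod (u + v) 1000007 - v) u := by
          have := hv2.sub (Int.ModEq.refl v)
          calc PySem.Int.mod (u + v) 1000007 - v ≡ (u + v) - v [ZMOD 1000007] := this
            _ = u := by ring
        exact this.mul_right y
      exact Hb.trans (h1.add h2).symm
    have Hb' : Int.ModEq 1000007 (PySem.Int.mod (a + b) 1000007)
        ((PySem.Int.mod (u + v) 1000007 - v)*x + v*y) := by
      have hc : Int.ModEq 1000007 (PySem.Int.mod (a + b) 1000007) (u*x + v*y) := by
        have : Int.ModEq 1000007 (PySem.Int.mod (a + b) 1000007) (a + b) := by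
          rw [PySem.Int.mod_eq_emod_of_pos hM]
          exact Int.emod_emod_of_dvd _ dvd_rfl
        exact this.trans hab
      have h1 : Int.ModEq 1000007 ((PySem.Int.mod (u + v) 1000007 - v)*x) (u*x) := by
        have : Int.ModEq 1000007 (PySem.Int.mod (u + v) 1000007 - v) u := by
          have := hv2.sub (Int.ModEq.refl v)
          calc PySem.Int.mod (u + v) 1000007 - v ≡ (u + v) - v [ZMOD 1000007] := this
            _ = u := by ring
        exact this.mul_right x
      exact hc.trans ((h1.add (Int.ModEq.refl (v*y))).symm)
    rw [ih b (PySem.Int.mod (a + b) 1000007) v (PySem.Int.mod (u + v) 1000007) Ha' Hb', hhead]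

-- ===== VERDICT (by name: the statement is the Claim_ definition above) =====
theorem fib_linked_list_spec : Claim_equal_fib_linked_list := by
  intro x y n _
  unfold Spec_fib_linked_list fib_linked_list fib_linked_list_alt
  rw [fibWalk_eq_gTail]
  rw [gTail_eq_map x y (n - 2).toNat x y 1 1
      (by show Int.ModEq 1000007 x ((2*1 - 1)*x + (1 - 1)*y); ring_nf; rfl)
      (by show Int.ModEq 1000007 y ((1 - 1)*x + 1*y); ring_nf; rfl)]
  rfl
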